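-- pv_equiv track=rewrite | github.com/liliyayaqiqi/sdlc_agent | review_agent/review_agent/orchestrator.py | _derive_module_prefixes
-- ===== SOURCE A (Python) =====
-- def _derive_module_prefixes(exact_prefixes: list[str]) -> list[str]:
--     widened: list[str] = []
--     for prefix in exact_prefixes:
--         parts = [part for part in prefix.split("/") if part]
--         if len(parts) > 4:
--             candidate = "/".join(parts[:-1])
--         else:
--             candidate = prefix
--         if candidate and candidate not in widened:
--             widened.append(candidate)
--     common = _common_prefix_path(widened)
--     if common and len(common.split("/")) >= 4:
--         return [common]
--     return widened[:8]
--
-- def _common_prefix_path(paths: list[str]) -> str: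
--     if not paths:
--         return ""
--     split_paths = [[part for part in path.split("/") if part] for path in paths]
--     common: list[str] = []
--     for index in range(min(len(parts) for parts in split_paths)):
--         token = split_paths[0][index]
--         if all(parts[index] == token for parts in split_paths[1:]):
--             common.append(token)
--         else:
--             break
--     return "/".join(common)
-- ===== SOURCE B (Python) =====
-- def _derive_module_prefixes(exact_prefixes):
--     widened = []
--     seen = set()
--     for prefix in exact_prefixes:
--         parts = [part for part in prefix.split("/") if part]
--         candidate = "/".join(parts[:-1]) if len(parts) > 4 else prefix
--         if candidate and candidate not in seen:
--             seen.add(candidate)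
--             widened.append(candidate)
--     split_paths = [[part for part in path.split("/") if part] for path in widened]
--     common_parts = []
--     if split_paths:
--         common_parts = split_paths[0]
--         for parts in split_paths[1:]:
--             common_parts = _lcp2(common_parts, parts)
--     common = "/".join(common_parts)
--     if common and len(common.split("/")) >= 4:
--         return [common]
--     return widened[:8]
--
--
-- def _lcp2(a, b):
--     if a and b and a[0] == b[0]:
--         return [a[0]] + _lcp2(a[1:], b[1:])
--     return []
-- ===== Notes on version B (the rewrite author's own statement) =====
-- stated objective: faster
-- what changed: Dedup membership now uses a seen-set instead of rescanning the widened list (quadratic to linear dedup), and the common prefix is computed by folding a pairwise longest-common-prefix over the split paths instead of A's per-index all-paths scan.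
import Mathlib
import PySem

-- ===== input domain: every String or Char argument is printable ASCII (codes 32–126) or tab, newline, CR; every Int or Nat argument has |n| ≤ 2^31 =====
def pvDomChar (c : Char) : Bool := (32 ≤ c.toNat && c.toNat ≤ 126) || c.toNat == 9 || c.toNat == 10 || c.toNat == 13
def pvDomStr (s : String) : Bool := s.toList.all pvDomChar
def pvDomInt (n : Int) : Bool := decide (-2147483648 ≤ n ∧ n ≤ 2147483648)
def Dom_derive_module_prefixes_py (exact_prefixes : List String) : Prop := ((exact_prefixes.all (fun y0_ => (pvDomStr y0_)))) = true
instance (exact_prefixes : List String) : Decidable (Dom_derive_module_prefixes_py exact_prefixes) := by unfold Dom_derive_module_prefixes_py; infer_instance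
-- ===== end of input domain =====

-- B replaces A's quadratic membership scan of `widened` by a `seen` set and A's
-- per-index scan over all split paths by a pairwise longest-common-prefix fold.

-- ===== PORT A =====

-- [part for part in s.split("/") if part]
def pySplitParts (s : String) : List String :=
  ((PySem.Str.split? s "/").getD []).filter (fun p => p != "")

-- the widening/dedup loop of A
def aWiden (exact_prefixes : List String) : List String :=
  exact_prefixes.foldl (fun widened prefix_ =>
    let parts := pySplitParts prefix_
    let candidate := if parts.length > 4
      then PySem.Str.join "/" (PySem.List.slice parts none (some (-1)))
      else prefix_
    if candidate != "" && !(widened.contains candidate)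
    then widened ++ [candidate] else widened) []

-- the index loop of _common_prefix_path: `for index in range(m)` with break,
-- fuel = m - idx.  `getD _ ""` is exact here: both indexings are in range
-- (idx < m = min of the lengths) whenever evaluated.
def pyLcpLoop (sp : List (List String)) : Nat → Nat → List String → List String
  | 0, _, common => common
  | n+1, idx, common =>
    let token := (sp.headD []).getD idx ""
    if sp.tail.all (fun parts => parts.getD idx "" == token)
    then pyLcpLoop sp n (idx+1) (common ++ [token])
    else common

-- _common_prefix_path
def aCommon (paths : List String) : String :=
  match paths with
  | [] => ""
  | _ =>
    let split_paths := paths.map pySplitParts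
    let lens := split_paths.map List.length
    let m := lens.foldl Nat.min (lens.headD 0)   -- min(len(parts) for parts in split_paths)
    PySem.Str.join "/" (pyLcpLoop split_paths m 0 [])

def derive_module_prefixes_py (exact_prefixes : List String) : List String :=
  let widened := aWiden exact_prefixes
  let common := aCommon widened
  if common != "" && (((PySem.Str.split? common "/").getD []).length ≥ 4)
  then [common]
  else PySem.List.slice widened none (some 8)

-- ===== PORT B =====

-- _lcp2 (recursive pairwise longest common prefix)
def lcp2 : List String → List String → List String
  | x :: xs, y :: ys => if x == y then x :: lcp2 xs ys else []
  | _, _ => []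

-- widening loop of B: (widened, seen) state
def bWiden (exact_prefixes : List String) : List String × PySem.Set String :=
  exact_prefixes.foldl (fun st prefix_ =>
    let parts := pySplitParts prefix_
    let candidate := if parts.length > 4
      then PySem.Str.join "/" (PySem.List.slice parts none (some (-1)))
      else prefix_
    if candidate != "" && !(PySem.Set.contains st.2 candidate)
    then (st.1 ++ [candidate], PySem.Set.add st.2 candidate) else st) ([], PySem.Set.empty)

def derive_module_prefixes_py_alt (exact_prefixes : List String) : List String :=
  let widened := (bWiden exact_prefixes).1
  let split_paths := widened.map pySplitParts
  let common_parts := match split_paths with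
    | [] => ([] : List String)
    | f :: rest => rest.foldl lcp2 f
  let common := PySem.Str.join "/" common_parts
  if common != "" && (((PySem.Str.split? common "/").getD []).length ≥ 4)
  then [common]
  else widened.take 8

-- ===== PRECONDITION & SPEC =====
def Spec_derive_module_prefixes_py (exact_prefixes : List String) (out : List String) : Prop := out = derive_module_prefixes_py_alt exact_prefixes
instance (exact_prefixes : List String) (out : List String) : Decidable (Spec_derive_module_prefixes_py exact_prefixes out) := by unfold Spec_derive_module_prefixes_py; infer_instance

-- ===== CLAIM (what is proved, stated in full; the proofs are below) =====
def Claim_equal_derive_module_prefixes_py : Prop := ∀ (exact_prefixes : List String), Dom_derive_module_prefixes_py exact_prefixes → Spec_derive_module_prefixes_py exact_prefixes (derive_module_prefixes_py exact_prefixes)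

-- ===== LEMMAS AND PROOFS =====

-- widening loops agree: the `seen` set always holds exactly the members of `widened`
theorem bWiden_go (l : List String) (w : List String) (s : PySem.Set String)
    (h : ∀ x : String, x ∈ s ↔ x ∈ w) :
    (l.foldl (fun st prefix_ =>
      let parts := pySplitParts prefix_
      let candidate := if parts.length > 4
        then PySem.Str.join "/" (PySem.List.slice parts none (some (-1)))
        else prefix_
      if candidate != "" && !(PySem.Set.contains st.2 candidate)
      then (st.1 ++ [candidate], PySem.Set.add st.2 candidate) else st) (w, s)).1
    = l.foldl (fun widened prefix_ =>
      let parts := pySplitParts prefix_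
      let candidate := if parts.length > 4
        then PySem.Str.join "/" (PySem.List.slice parts none (some (-1)))
        else prefix_
      if candidate != "" && !(widened.contains candidate)
      then widened ++ [candidate] else widened) w := by
  induction l generalizing w s with
  | nil => rfl
  | cons p t ih =>
    simp only [List.foldl_cons]
    set c := if (pySplitParts p).length > 4
      then PySem.Str.join "/" (PySem.List.slice (pySplitParts p) none (some (-1)))
      else p with hc
    have hcontains : PySem.Set.contains s c = w.contains c := by
      simp only [List.contains_eq_mem, PySem.Set.contains_eq_listContains]
      simp [h c]
    simp only [hcontains]
    by_cases hcond : (c != "" && !(w.contains c)) = true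
    · simp only [hcond, if_pos]
      apply ih
      intro x
      have hcm : c ∉ s := by
        have := (h c)
        simp only [List.contains_eq_mem, Bool.and_eq_true, Bool.not_eq_true',
          decide_eq_false_iff_not] at hcond
        intro hx; exact hcond.2 (this.mp hx)
      rw [PySem.Set.add_of_not_mem hcm]
      simp [h x]
    · simp only [hcond, if_neg, Bool.false_eq_true, not_false_iff]
      · exact ih w s h

theorem bWiden_eq (exact_prefixes : List String) :
    (bWiden exact_prefixes).1 = aWiden exact_prefixes := by
  unfold bWiden aWiden
  exact bWiden_go exact_prefixes [] PySem.Set.empty (by simp [PySem.Set.empty])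

-- lcp fold prefix facts
theorem lcp2_prefix_left (a b : List String) : lcp2 a b <+: a := by
  induction a generalizing b with
  | nil => cases b <;> simp [lcp2]
  | cons x xs ih =>
    cases b with
    | nil => simp [lcp2]
    | cons y ys =>
      simp only [lcp2]
      by_cases h : x = y
      · simp [h, List.cons_prefix_cons, ih ys]
      · simp [h]

theorem lcp2_prefix_right (a b : List String) : lcp2 a b <+: b := by
  induction a generalizing b with
  | nil => cases b <;> simp [lcp2]
  | cons x xs ih =>
    cases b with
    | nil => simp [lcp2]
    | cons y ys =>
      simp only [lcp2]
      by_cases h : x = y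
      · simp [h, List.cons_prefix_cons, ih ys]
      · simp [h]

theorem foldl_lcp2_prefix_init (L : List (List String)) (a : List String) :
    L.foldl lcp2 a <+: a := by
  induction L generalizing a with
  | nil => exact List.prefix_refl a
  | cons r L ih =>
    exact (ih (lcp2 a r)).trans (lcp2_prefix_left a r)

theorem foldl_lcp2_prefix_mem (L : List (List String)) (a b : List String) (hb : b ∈ L) :
    L.foldl lcp2 a <+: b := by
  induction L generalizing a with
  | nil => cases hb
  | cons r L ih =>
    rcases List.mem_cons.mp hb with h | h
    · subst h
      exact (foldl_lcp2_prefix_init L (lcp2 a b)).trans (lcp2_prefix_right a b)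
    · exact ih (lcp2 a r) h

-- a mismatch in any list of L forces the fold to []
theorem foldl_lcp2_eq_nil_of_mismatch (L : List (List String)) (t u : String)
    (a' b' : List String) (hb : (u :: b') ∈ L) (hne : u ≠ t) :
    L.foldl lcp2 (t :: a') = [] := by
  have h1 := foldl_lcp2_prefix_init L (t :: a')
  have h2 := foldl_lcp2_prefix_mem L (t :: a') (u :: b') hb
  cases hR : L.foldl lcp2 (t :: a') with
  | nil => rfl
  | cons r rs =>
    rw [hR] at h1 h2
    exact absurd ((List.cons_prefix_cons.mp h2).1.symm.trans
      (List.cons_prefix_cons.mp h1).1) hne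

-- when every list of L starts with t, the fold strips the common head
theorem foldl_lcp2_cons_of_heads (L : List (List String)) (t : String) (a : List String)
    (h : ∀ b ∈ L, ∃ b', b = t :: b') :
    L.foldl lcp2 (t :: a) = t :: (L.map List.tail).foldl lcp2 a := by
  induction L generalizing a with
  | nil => rfl
  | cons r L ih =>
    obtain ⟨b', rfl⟩ := h r (List.mem_cons_self ..)
    simp only [List.foldl_cons, List.map_cons, List.tail_cons, lcp2]
    simp only [BEq.rfl, if_true]
    exact ih (lcp2 a b') (fun b hb => h b (List.mem_cons_of_mem _ hb))

-- the running minimum is a lower bound …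
theorem foldl_min_le (l : List Nat) (a : Nat) :
    l.foldl Nat.min a ≤ a ∧ ∀ x ∈ l, l.foldl Nat.min a ≤ x := by
  induction l generalizing a with
  | nil => simp
  | cons y l ih =>
    have h := ih (Nat.min a y)
    refine ⟨h.1.trans (Nat.min_le_left a y), ?_⟩
    intro x hx
    rcases List.mem_cons.mp hx with rfl | hx
    · exact h.1.trans (Nat.min_le_right a x)
    · exact h.2 x hx

-- … and is attained
theorem foldl_min_attained (l : List Nat) (a : Nat) :
    l.foldl Nat.min a = a ∨ l.foldl Nat.min a ∈ l := by
  induction l generalizing a with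
  | nil => simp
  | cons y l ih =>
    rcases ih (Nat.min a y) with h | h
    · rcases Nat.le_total a y with hy | hy
      · left; rw [List.foldl_cons, h]; simp [hy]
      · right; rw [List.foldl_cons, h]
        have hmin : a.min y = y := by simp [hy]
        rw [hmin]; exact List.mem_cons_self ..
    · right; exact List.mem_cons_of_mem _ h

-- A's index loop computes the pairwise-lcp fold of the dropped tails
theorem lcpLoop_inv (n : Nat) :
    ∀ (idx : Nat) (acc : List String) (first : List String) (rest : List (List String)),
    idx + n = (rest.map List.length).foldl Nat.min first.length →
    pyLcpLoop (first :: rest) n idx acc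
      = acc ++ (rest.map (List.drop idx)).foldl lcp2 (first.drop idx) := by
  induction n with
  | zero =>
    intro idx acc first rest hm
    rw [Nat.add_zero] at hm
    show acc = _
    rcases foldl_min_attained (rest.map List.length) first.length with h | h
    · rw [h] at hm
      have : first.drop idx = [] := List.drop_eq_nil_iff.mpr (Nat.le_of_eq hm.symm)
      rw [this]
      have := List.prefix_nil.mp (foldl_lcp2_prefix_init (rest.map (List.drop idx)) [])
      rw [this, List.append_nil]
    · rw [← hm] at h
      obtain ⟨r, hr, hlen⟩ := List.mem_map.mp h
      have hdrop : r.drop idx = [] := List.drop_eq_nil_iff.mpr (Nat.le_of_eq hlen)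
      have hmem : ([] : List String) ∈ rest.map (List.drop idx) :=
        hdrop ▸ List.mem_map_of_mem hr
      have := List.prefix_nil.mp
        (foldl_lcp2_prefix_mem (rest.map (List.drop idx)) (first.drop idx) [] hmem)
      rw [this, List.append_nil]
  | succ n ih =>
    intro idx acc first rest hm
    have hmin := foldl_min_le (rest.map List.length) first.length
    have hfirst : idx < first.length := by omega
    have hrest : ∀ r ∈ rest, idx < r.length := by
      intro r hr
      have := hmin.2 r.length (List.mem_map_of_mem hr)
      omega
    show (if (first :: rest).tail.all
        (fun parts => parts.getD idx "" == ((first :: rest).headD []).getD idx "") = true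
      then pyLcpLoop (first :: rest) n (idx+1)
        (acc ++ [((first :: rest).headD []).getD idx ""])
      else acc) = _
    have htok : ((first :: rest).headD []).getD idx "" = first[idx] := by
      simp [List.getElem?_eq_getElem hfirst]
    rw [htok]
    simp only [List.tail_cons]
    have hdropf : first.drop idx = first[idx] :: first.drop (idx + 1) :=
      List.drop_eq_getElem_cons hfirst
    by_cases hall : rest.all (fun parts => parts.getD idx "" == first[idx]) = true
    · rw [if_pos hall]
      simp only [List.all_eq_true, beq_iff_eq] at hall
      have hheads : ∀ b ∈ rest.map (List.drop idx), ∃ b', b = first[idx] :: b' := by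
        intro b hb
        obtain ⟨r, hr, rfl⟩ := List.mem_map.mp hb
        have hlt := hrest r hr
        have : r.getD idx "" = r[idx] := List.getD_eq_getElem r "" hlt
        refine ⟨r.drop (idx+1), ?_⟩
        rw [List.drop_eq_getElem_cons hlt, ← this, hall r hr]
      rw [ih (idx+1) (acc ++ [first[idx]]) first rest (by omega)]
      rw [hdropf, foldl_lcp2_cons_of_heads _ _ _ hheads]
      have hmap : (rest.map (List.drop idx)).map List.tail = rest.map (List.drop (idx+1)) := by
        rw [List.map_map]
        exact List.map_congr_left (fun r _ => by
          simp [Function.comp, List.tail_drop])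
      rw [hmap, List.append_assoc]
      rfl
    · rw [if_neg hall]
      simp only [List.all_eq_true, beq_iff_eq] at hall
      push Not at hall
      obtain ⟨r, hr, hne⟩ := hall
      have hlt := hrest r hr
      rw [List.getD_eq_getElem r "" hlt] at hne
      have hmem : (r[idx] :: r.drop (idx+1)) ∈ rest.map (List.drop idx) := by
        rw [← List.drop_eq_getElem_cons hlt]
        exact List.mem_map_of_mem hr
      rw [hdropf, foldl_lcp2_eq_nil_of_mismatch _ _ _ _ _ hmem hne, List.append_nil]

-- the common-prefix computations agree
theorem common_eq (paths : List String) :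
    aCommon paths = PySem.Str.join "/"
      (match paths.map pySplitParts with
        | [] => ([] : List String)
        | f :: rest => rest.foldl lcp2 f) := by
  cases paths with
  | nil => rfl
  | cons p ps =>
    show PySem.Str.join "/" _ = _
    simp only [List.map_cons]
    congr 1
    have hm : List.foldl Nat.min
        (((pySplitParts p).length :: ((ps.map pySplitParts).map List.length)).headD 0)
        ((pySplitParts p).length :: ((ps.map pySplitParts).map List.length))
        = List.foldl Nat.min (pySplitParts p).length ((ps.map pySplitParts).map List.length) := by
      simp
    rw [hm, lcpLoop_inv _ 0 [] (pySplitParts p) (ps.map pySplitParts) (by omega)]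
    simp [Function.comp_def]

-- ===== VERDICT (by name: the statement is the Claim_ definition above) =====
theorem derive_module_prefixes_py_spec : Claim_equal_derive_module_prefixes_py := by
  intro xs _
  show derive_module_prefixes_py xs = derive_module_prefixes_py_alt xs
  have hslice : ∀ w : List String, PySem.List.slice w none (some 8) = w.take 8 := by
    intro w
    rw [show (8 : Int) = ((8 : Nat) : Int) from rfl, PySem.List.slice_to_natCast]
  simp only [derive_module_prefixes_py, derive_module_prefixes_py_alt, bWiden_eq,
    common_eq, hslice]
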